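-- pv_equiv track=rewrite | github.com/Arsen1302/Code-copy-detector | TestData/solutions/problem_854_1.py | solution_854_1
-- ===== SOURCE A (Python) =====
-- from typing import List
--
-- def solution_854_1(board: List[str]) -> List[int]:
--     """bottom-up dp"""
--     n = len(board) #dimension
--
--     #count > 0 also indicates state is reachable
--     dp = [[0, 0] for _ in range(n+1)] #score-count (augment by 1 for convenience)
--
--     for i in reversed(range(n)):
--         #not assuming reachability while updating state
--         copy = [[0, 0] for _ in range(n+1)] #to be updated to new dp
--         for j in reversed(range(n)):
--             if board[i][j] == "X": continue #skip obstacle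
--             if board[i][j] == "S": #initialize "S"
--                 copy[j] = [0, 1]
--                 continue
--             #find max score from neighbors
--             for candidate in (copy[j+1], dp[j], dp[j+1]): #right/below/right-below
--                 if not candidate[1]: continue #not reachable
--                 if copy[j][0] < candidate[0]: copy[j] = candidate[:]
--                 elif copy[j][0] == candidate[0]: copy[j][1] = (copy[j][1] + candidate[1])%(10**9+7)
--             #update with board number
--             if board[i][j] != "E": copy[j][0] += int(board[i][j])
--         dp = copy
--     return dp[0]
-- ===== SOURCE B (Python) =====
-- from typing import List
--
-- MOD = 10 ** 9 + 7
--
-- def solution_854_1(board: List[str]) -> List[int]: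
--     """recursive row-by-row dp: each row is computed from the row below and
--     built back-to-front by prepending, with a pure neighbor-combine helper"""
--     n = len(board)
--
--     def combine(cands):
--         best, cnt = 0, 0
--         for s, k in cands:
--             if k == 0:
--                 continue
--             if s > best:
--                 best, cnt = s, k
--             elif s == best:
--                 cnt = (cnt + k) % MOD
--         return best, cnt
--
--     def rows(i):
--         if i >= n:
--             return [(0, 0)] * (n + 1)
--         lower = rows(i + 1)
--         cur = [(0, 0)]
--         for j in range(n - 1, -1, -1):
--             c = board[i][j]
--             if c == "X":
--                 v = (0, 0)
--             elif c == "S":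
--                 v = (0, 1)
--             else:
--                 s, k = combine((cur[0], lower[j], lower[j + 1]))
--                 v = (s + int(c), k) if c != "E" else (s, k)
--             cur = [v] + cur
--         return cur
--
--     top = rows(0)[0]
--     return [top[0], top[1]]
-- ===== Notes on version B (the rewrite author's own statement) =====
-- stated objective: alternative
-- what changed: Replaces A's iterative bottom-up DP that mutates an indexed row array (copy[j] writes, in-place candidate merging over reversed ranges) by a recursion over rows: rows(i) is computed purely from rows(i+1), each row is built back-to-front by prepending, and neighbor merging is a pure combine helper.
import Mathlib
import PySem

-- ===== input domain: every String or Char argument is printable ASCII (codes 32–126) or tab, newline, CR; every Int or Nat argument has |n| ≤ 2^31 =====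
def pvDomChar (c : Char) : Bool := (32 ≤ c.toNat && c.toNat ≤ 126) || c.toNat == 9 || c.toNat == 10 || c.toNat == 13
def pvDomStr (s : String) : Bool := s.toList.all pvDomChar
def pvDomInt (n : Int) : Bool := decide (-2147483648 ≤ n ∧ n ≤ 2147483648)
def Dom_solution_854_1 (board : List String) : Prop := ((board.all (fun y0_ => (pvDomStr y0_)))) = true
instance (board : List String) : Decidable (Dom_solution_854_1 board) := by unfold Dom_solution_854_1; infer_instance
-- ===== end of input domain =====

-- B replaces A's index-mutating double loop by a recursion over rows that builds each
-- row back-to-front by prepending, with a pure neighbor-combine helper (objective: alternative).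

-- ===== PORT A =====
-- the inner 'for candidate in …' body of A (cur = copy[j], cand = candidate)
def pvMergeA (cur cand : Int × Int) : Int × Int :=
  if cand.2 = 0 then cur
  else if cur.1 < cand.1 then cand
  else if cur.1 = cand.1 then (cur.1, PySem.Int.mod (cur.2 + cand.2) (10 ^ 9 + 7))
  else cur

-- board[i][j]; exact under Pre_ (both indices in range there)
def pvCellA (board : List String) (i j : Nat) : Char :=
  (board.getD i "").toList.getD j ' '

-- body of A's loop over j (state = copy)
def pvStepA (board : List String) (i : Nat) (dp : List (Int × Int))
    (copy : List (Int × Int)) (j : Nat) : List (Int × Int) :=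
  let c := pvCellA board i j
  if c = 'X' then copy
  else if c = 'S' then copy.set j (0, 1)
  else
    let v := [copy.getD (j+1) (0,0), dp.getD j (0,0), dp.getD (j+1) (0,0)].foldl
               pvMergeA (copy.getD j (0,0))
    let v2 := if c ≠ 'E' then (v.1 + ((PySem.Int.ofChars? [c]).getD 0), v.2) else v
    copy.set j v2

-- A's loop over j (reversed(range(n))), producing the new dp row
def pvRowA (board : List String) (n i : Nat) (dp : List (Int × Int)) : List (Int × Int) :=
  (List.range n).reverse.foldl (pvStepA board i dp) (List.replicate (n+1) ((0:Int), (0:Int)))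

def solution_854_1 (board : List String) : List Int :=
  let n := board.length
  let dp := (List.range n).reverse.foldl (fun dp i => pvRowA board n i dp)
              (List.replicate (n+1) ((0:Int), (0:Int)))
  [(dp.getD 0 (0,0)).1, (dp.getD 0 (0,0)).2]

-- ===== PORT B =====
-- B's pure combine helper (fold over the three neighbor candidates)
def pvCombineB (cands : List (Int × Int)) : Int × Int :=
  cands.foldl (fun best sk =>
    if sk.2 = 0 then best
    else if best.1 < sk.1 then sk
    else if best.1 = sk.1 then (best.1, PySem.Int.mod (best.2 + sk.2) (10 ^ 9 + 7))
    else best) ((0:Int), (0:Int))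

-- board[i][j]; exact under Pre_ (both indices in range there)
def pvCellB (board : List String) (i j : Nat) : Char :=
  (board.getD i "").toList.getD j ' '

-- body of B's 'for j in range(n-1, -1, -1)' loop: compute v and prepend it
def pvStepB (board : List String) (i : Nat) (lower : List (Int × Int))
    (cur : List (Int × Int)) (j : Nat) : List (Int × Int) :=
  let c := pvCellB board i j
  let v :=
    if c = 'X' then ((0:Int), (0:Int))
    else if c = 'S' then ((0:Int), (1:Int))
    else
      let sk := pvCombineB [cur.getD 0 (0,0), lower.getD j (0,0), lower.getD (j+1) (0,0)]
      if c ≠ 'E' then (sk.1 + ((PySem.Int.ofChars? [c]).getD 0), sk.2) else sk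
  v :: cur

-- B's rows(i): recursion over rows (guard 'i >= n' as in Source B)
def pvRowsB (board : List String) (n i : Nat) : List (Int × Int) :=
  if h : n ≤ i then List.replicate (n+1) ((0:Int), (0:Int))
  else (List.range n).reverse.foldl (pvStepB board i (pvRowsB board n (i+1)))
         [((0:Int), (0:Int))]
  termination_by n - i
  decreasing_by omega

def solution_854_1_alt (board : List String) : List Int :=
  let n := board.length
  let top := (pvRowsB board n 0).getD 0 (0,0)
  [top.1, top.2]

-- ===== PRECONDITION & SPEC =====
-- Exactly where Python A returns: every row is at least n chars long and every scanned
-- cell (first n chars of each row) is 'X', 'S', 'E' or a digit (else IndexError/ValueError).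
def Pre_solution_854_1 (board : List String) : Prop :=
  ∀ s ∈ board, board.length ≤ s.toList.length ∧
    ∀ j < board.length,
      s.toList.getD j ' ' ∈ (['X','S','E','0','1','2','3','4','5','6','7','8','9'] : List Char)
instance (board : List String) : Decidable (Pre_solution_854_1 board) := by
  unfold Pre_solution_854_1; infer_instance

def pvWitness_solution_854_1 : List String := ["E1", "2S"]

def Spec_solution_854_1 (board : List String) (out : List Int) : Prop := out = solution_854_1_alt board
instance (board : List String) (out : List Int) : Decidable (Spec_solution_854_1 board out) := by
  unfold Spec_solution_854_1; infer_instance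

-- ===== CLAIM (what is proved, stated in full; the proofs are below) =====
def Claim_equal_solution_854_1 : Prop := ∀ (board : List String), Dom_solution_854_1 board → Pre_solution_854_1 board → Spec_solution_854_1 board (solution_854_1 board)

-- ===== LEMMAS AND PROOFS =====

-- the two candidate-merge folds are the same function
lemma pv_merge_eq (l : List (Int × Int)) :
    l.foldl pvMergeA ((0:Int), (0:Int)) = pvCombineB l := rfl

lemma pv_cellB_eq : pvCellB = pvCellA := rfl

lemma pv_set_replicate_last {α : Type} (j : Nat) (z v : α) :
    (List.replicate (j+1) z).set j v = List.replicate j z ++ [v] := by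
  induction j with
  | zero => simp
  | succ j ih => simpa [List.replicate_succ] using ih

lemma pv_set_replicate_cons {α : Type} (j : Nat) (z v : α) (C : List α) :
    (List.replicate (j+1) z ++ C).set j v = List.replicate j z ++ v :: C := by
  induction j generalizing C with
  | zero => simp
  | succ j ih => simpa [List.replicate_succ] using ih C

lemma pv_getD_replicate_append_left {α : Type} (j : Nat) (z d : α) (C : List α) :
    (List.replicate (j+1) z ++ C).getD j d = z := by
  rw [List.getD_append _ _ _ _ (by simp)]
  simp

lemma pv_getD_replicate_append_right {α : Type} (j : Nat) (z d : α) (C : List α) :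
    (List.replicate (j+1) z ++ C).getD (j+1) d = C.getD 0 d := by
  rw [List.getD_append_right _ _ _ _ (by simp)]
  simp

-- one inner step: A's in-place update of copy = B's prepend, through the padding invariant
lemma pv_step_eq (board : List String) (i : Nat) (dp C : List (Int × Int)) (j : Nat) :
    pvStepA board i dp (List.replicate (j+1) ((0:Int),(0:Int)) ++ C) j
      = List.replicate j ((0:Int),(0:Int)) ++ pvStepB board i dp C j := by
  unfold pvStepA pvStepB
  rw [pv_cellB_eq]
  by_cases hX : pvCellA board i j = 'X'
  · simp [hX, List.replicate_succ' (n := j)]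
  · by_cases hS : pvCellA board i j = 'S'
    · simp [hS, pv_set_replicate_last]
    · simp only [hX, hS, if_false]
      rw [pv_getD_replicate_append_left, pv_getD_replicate_append_right,
          pv_merge_eq, pv_set_replicate_cons]

-- inner loop invariant: after processing indices n-1 … n-k, A's copy equals
-- (n-k) zero-pads followed by B's cur
lemma pv_inner_inv (board : List String) (i n : Nat) (dp : List (Int × Int)) :
    ∀ k, k ≤ n →
      (List.range' (n-k) k).reverse.foldl (pvStepA board i dp)
          (List.replicate (n+1) ((0:Int),(0:Int)))
        = List.replicate (n-k) ((0:Int),(0:Int)) ++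
          (List.range' (n-k) k).reverse.foldl (pvStepB board i dp) [((0:Int),(0:Int))] := by
  intro k
  induction k with
  | zero =>
    intro _
    simp [List.replicate_succ' (n := n)]
  | succ k ih =>
    intro hk
    have hj : n - (k+1) + 1 = n - k := by omega
    have hsplit : List.range' (n-(k+1)) (k+1) = (n-(k+1)) :: List.range' (n-k) k := by
      rw [List.range'_succ, hj]
    rw [hsplit]
    simp only [List.reverse_cons, List.foldl_append, List.foldl_cons, List.foldl_nil]
    rw [ih (by omega)]
    rw [show n - k = (n - (k+1)) + 1 from hj.symm]
    rw [pv_step_eq board i dp _ (n-(k+1))]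

lemma pv_row_eq (board : List String) (n i : Nat) (dp : List (Int × Int)) :
    pvRowA board n i dp
      = (List.range n).reverse.foldl (pvStepB board i dp) [((0:Int),(0:Int))] := by
  unfold pvRowA
  have h := pv_inner_inv board i n dp n (le_refl n)
  rw [Nat.sub_self] at h
  rw [List.range_eq_range']
  simpa using h

-- outer loop invariant: A's dp after processing rows n-1 … n-k equals B's rows(n-k)
lemma pv_outer_inv (board : List String) (n : Nat) :
    ∀ k, k ≤ n →
      (List.range' (n-k) k).reverse.foldl (fun dp i => pvRowA board n i dp)
          (List.replicate (n+1) ((0:Int),(0:Int)))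
        = pvRowsB board n (n-k) := by
  intro k
  induction k with
  | zero =>
    intro _
    rw [Nat.sub_zero]
    rw [pvRowsB]
    simp
  | succ k ih =>
    intro hk
    have hj : n - (k+1) + 1 = n - k := by omega
    have hsplit : List.range' (n-(k+1)) (k+1) = (n-(k+1)) :: List.range' (n-k) k := by
      rw [List.range'_succ, hj]
    rw [hsplit]
    simp only [List.reverse_cons, List.foldl_append, List.foldl_cons, List.foldl_nil]
    rw [ih (by omega)]
    have hlt : ¬ n ≤ n - (k+1) := by omega
    conv_rhs => rw [pvRowsB]
    rw [dif_neg hlt, pv_row_eq, hj]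

lemma pv_ports_eq (board : List String) : solution_854_1 board = solution_854_1_alt board := by
  have h := pv_outer_inv board board.length board.length (le_refl _)
  rw [Nat.sub_self] at h
  rw [← List.range_eq_range'] at h
  simp only [solution_854_1, solution_854_1_alt]
  rw [h]

-- ===== VERDICT (by name: the statement is the Claim_ definition above) =====
theorem solution_854_1_spec : Claim_equal_solution_854_1 := by
  intro board _ _
  unfold Spec_solution_854_1
  exact pv_ports_eq board
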